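-- pv_equiv track=rewrite | github.com/MIT-ILS-Lab/GEHD | main_model/src/data/generate_problem_data.py | transform_solution
-- ===== SOURCE A (Python) =====
-- def transform_solution(solution):
--     """
--     Converts a one-row solution format to a two-row format with nodes and flags.
--
--     Args:
--         solution: Original solution as a list with depot (0) separating routes
--
--     Returns:
--         List containing nodes followed by flags (1 for start of route, 0 otherwise)
--     """
--     node = []
--     flag = []
--     for i in range(1, len(solution)):
--         if solution[i] != 0:
--             node.append(solution[i])
--         if solution[i] != 0 and solution[i - 1] == 0:
--             flag.append(1)
--         if solution[i] != 0 and solution[i - 1] != 0: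
--             flag.append(0)
--     node_flag = node + flag
--     return node_flag
-- ===== SOURCE B (Python) =====
-- def transform_solution(solution):
--     """Two-row format via run-splitting: nodes = nonzeros of solution[1:];
--     flags emitted one maximal nonzero run (route) at a time."""
--     tail = solution[1:]
--     nodes = [x for x in tail if x != 0]
--     flags = []
--     prev_zero = solution[0] == 0 if solution else True
--     n = len(tail)
--     i = 0
--     while i < n:
--         if tail[i] == 0:
--             prev_zero = True
--             i += 1
--             continue
--         # maximal run of consecutive nonzeros (one route) starting at i
--         j = i + 1
--         while j < n and tail[j] != 0:
--             j += 1
--         flags.append(1 if prev_zero else 0)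
--         flags.extend([0] * (j - i - 1))
--         prev_zero = False
--         i = j
--     return nodes + flags
-- ===== Notes on version B (the rewrite author's own statement) =====
-- stated objective: alternative
-- what changed: Replaces A's single element-wise pass with three per-element tests by a run-splitting pass: nodes are one filter of the tail, and flags are emitted per maximal nonzero run (one route) as a leading 1/0 followed by a block of zeros.
import Mathlib
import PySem

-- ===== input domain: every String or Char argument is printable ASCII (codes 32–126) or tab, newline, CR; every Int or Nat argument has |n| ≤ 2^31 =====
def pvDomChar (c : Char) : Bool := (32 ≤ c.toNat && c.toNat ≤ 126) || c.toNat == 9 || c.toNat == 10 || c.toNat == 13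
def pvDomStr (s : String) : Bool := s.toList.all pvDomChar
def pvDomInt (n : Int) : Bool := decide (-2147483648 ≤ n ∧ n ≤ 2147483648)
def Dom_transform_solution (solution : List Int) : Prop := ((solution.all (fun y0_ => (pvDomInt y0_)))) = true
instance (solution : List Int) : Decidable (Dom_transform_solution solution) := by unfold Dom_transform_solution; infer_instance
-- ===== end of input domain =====

-- B replaces A's element-wise pass (three tests per element) by a run-splitting pass:
-- nodes are one filter of the tail, flags are emitted per maximal nonzero run (route).


-- ===== PORT A =====
-- for i in range(1, len(solution)): three independent ifs appending to node / flag
def transform_solution (solution : List Int) : List Int :=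
  let nf :=
    (PySem.List.pyRange 1 (solution.length : Int) 1).foldl
      (fun (acc : List Int × List Int) (i : Int) =>
        let si := PySem.List.pyGetD solution i 0        -- solution[i], always in range
        let sp := PySem.List.pyGetD solution (i - 1) 0  -- solution[i-1], always in range
        let node := if si ≠ 0 then acc.1 ++ [si] else acc.1
        let flag :=
          if si ≠ 0 ∧ sp = 0 then acc.2 ++ [1]
          else if si ≠ 0 ∧ sp ≠ 0 then acc.2 ++ [0]
          else acc.2
        (node, flag))
      ([], [])
  nf.1 ++ nf.2

-- ===== PORT B =====
-- inner while: length of the maximal leading nonzero run of xs, and the rest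
def takeRun : List Int → Nat × List Int
  | [] => (0, [])
  | x :: xs => if x == 0 then (0, x :: xs) else ((takeRun xs).1 + 1, (takeRun xs).2)

theorem takeRun_len (xs : List Int) : (takeRun xs).2.length ≤ xs.length := by
  induction xs with
  | nil => simp [takeRun]
  | cons x xs ih =>
      by_cases h : x == 0
      · simp [takeRun, h]
      · simp [takeRun, h]; omega

-- outer while over the tail: one flag group [1/0, 0, …, 0] per maximal nonzero run
def flagsOf : Bool → List Int → List Int
  | _, [] => []
  | prevZero, x :: xs =>
    if x == 0 then flagsOf true xs
    else ((if prevZero then (1 : Int) else 0) :: List.replicate (takeRun xs).1 0)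
           ++ flagsOf false (takeRun xs).2
termination_by _ xs => xs.length
decreasing_by
  · simp
  · have := takeRun_len xs; simp; omega

def transform_solution_alt (solution : List Int) : List Int :=
  let tail := PySem.List.slice solution (some 1) none   -- solution[1:]
  let nodes := tail.filter (fun x => x ≠ 0)
  let prevZero : Bool := match solution with | [] => true | s0 :: _ => s0 == 0
  nodes ++ flagsOf prevZero tail

-- ===== PRECONDITION & SPEC =====
def Spec_transform_solution (solution : List Int) (out : List Int) : Prop := out = transform_solution_alt solution
instance (solution : List Int) (out : List Int) : Decidable (Spec_transform_solution solution out) := by unfold Spec_transform_solution; infer_instance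

-- ===== CLAIM (what is proved, stated in full; the proofs are below) =====
def Claim_equal_transform_solution : Prop := ∀ (solution : List Int), Dom_transform_solution solution → Spec_transform_solution solution (transform_solution solution)

-- ===== LEMMAS AND PROOFS =====

-- A's loop body rephrased as a structural recursion carrying the previous element
def aLoop (prev : Int) (tl : List Int) (node flag : List Int) : List Int × List Int :=
  match tl with
  | [] => (node, flag)
  | x :: xs =>
      aLoop x xs
        (if x ≠ 0 then node ++ [x] else node)
        (if x ≠ 0 ∧ prev = 0 then flag ++ [1]
         else if x ≠ 0 ∧ prev ≠ 0 then flag ++ [0]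
         else flag)

theorem aLoop_bridge (sol : List Int) : ∀ (k : Nat) (acc : List Int × List Int),
    (PySem.List.pyRange ((k : Int) + 1) (sol.length : Int) 1).foldl
      (fun (acc : List Int × List Int) (i : Int) =>
        let si := PySem.List.pyGetD sol i 0
        let sp := PySem.List.pyGetD sol (i - 1) 0
        let node := if si ≠ 0 then acc.1 ++ [si] else acc.1
        let flag :=
          if si ≠ 0 ∧ sp = 0 then acc.2 ++ [1]
          else if si ≠ 0 ∧ sp ≠ 0 then acc.2 ++ [0]
          else acc.2
        (node, flag)) acc
    = aLoop (sol.getD k 0) (sol.drop (k + 1)) acc.1 acc.2 := by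
  intro k acc
  have main : ∀ (m k : Nat) (acc : List Int × List Int), sol.length ≤ k + 1 + m →
      (PySem.List.pyRange ((k : Int) + 1) (sol.length : Int) 1).foldl
        (fun (acc : List Int × List Int) (i : Int) =>
          let si := PySem.List.pyGetD sol i 0
          let sp := PySem.List.pyGetD sol (i - 1) 0
          let node := if si ≠ 0 then acc.1 ++ [si] else acc.1
          let flag :=
            if si ≠ 0 ∧ sp = 0 then acc.2 ++ [1]
            else if si ≠ 0 ∧ sp ≠ 0 then acc.2 ++ [0]
            else acc.2
          (node, flag)) acc
      = aLoop (sol.getD k 0) (sol.drop (k + 1)) acc.1 acc.2 := by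
    intro m
    induction m with
    | zero =>
        intro k acc h
        rw [PySem.List.pyRange_one_eq_nil (by omega),
            List.drop_eq_nil_of_le (by omega)]
        simp [aLoop]
    | succ m ih =>
        intro k acc h
        by_cases hk : sol.length ≤ k + 1
        · rw [PySem.List.pyRange_one_eq_nil (by omega),
              List.drop_eq_nil_of_le (by omega)]
          simp [aLoop]
        · have hlt : k + 1 < sol.length := by omega
          rw [PySem.List.pyRange_one_cons (by omega), List.foldl_cons,
              List.drop_eq_getElem_cons hlt, aLoop]
          have h1 : ((k : Int) + 1 + 1) = ((k + 1 : Nat) : Int) + 1 := by push_cast; ring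
          have h2 : ((k : Int) + 1) = ((k + 1 : Nat) : Int) := by push_cast; ring
          rw [h1]
          rw [ih (k + 1) _ (by omega)]
          simp only [h2, PySem.List.pyGetD_natCast, List.getD_eq_getElem?_getD, List.getElem?_eq_getElem hlt]
          simp
  exact main sol.length k acc (by omega)

theorem flagsOf_false (xs : List Int) :
    flagsOf false xs = List.replicate (takeRun xs).1 0 ++ flagsOf false (takeRun xs).2 := by
  cases xs with
  | nil => simp [flagsOf, takeRun]
  | cons x xs =>
      by_cases h : x = 0
      · simp [flagsOf, takeRun, h]
      · simp [flagsOf, takeRun, h, List.replicate_succ]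

theorem aLoop_spec (tl : List Int) : ∀ (prev : Int) (node flag : List Int),
    aLoop prev tl node flag
      = (node ++ tl.filter (fun x => x ≠ 0), flag ++ flagsOf (prev == 0) tl) := by
  induction tl with
  | nil => intro prev node flag; simp [aLoop, flagsOf]
  | cons x xs ih =>
      intro prev node flag
      by_cases hx : x = 0
      · simp [aLoop, hx, ih, flagsOf]
      · rw [aLoop, ih]
        by_cases hp : prev = 0
        all_goals
          have hx' : (x == 0) = false := by simp [hx]
          simp [hx, hp, flagsOf, hx', flagsOf_false xs]

-- ===== VERDICT (by name: the statement is the Claim_ definition above) =====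
theorem transform_solution_spec : Claim_equal_transform_solution := by
  intro solution _
  unfold Spec_transform_solution transform_solution transform_solution_alt
  cases solution with
  | nil => simp [PySem.List.pyRange_one_eq_nil, PySem.List.slice, flagsOf]
  | cons s0 tl =>
      have hb := aLoop_bridge (s0 :: tl) 0 ([], [])
      simp only [Nat.cast_zero, Int.zero_add] at hb
      simp only [hb]
      rw [aLoop_spec]
      simp [PySem.List.slice_from_one]
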